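-- pv_equiv track=rewrite | github.com/miliar/Code_Jam_Webscraper | solutions_python/Problem_96/800.py | get_possible_triplets
-- ===== SOURCE A (Python) =====
-- def get_possible_triplets(number, best_result_least):
--     #all possible triplets for this number
--     all = []
--     for a in range(0, 11):
--         for b in range(0, 11):
--             for c in range(0, 11):
--                 if a+b+c == number:
--                     #my new triplet
--                     triplet = (a, b, c)
--
--                     #build score-diff-list
--                     triplet_set = list(set(list(triplet)))
--                     score_diffs = []
--
--                     if len(triplet_set) > 1:
--                         score_diffs.append(abs(triplet_set[0] - triplet_set[1]))
--
--                     if len(triplet_set) > 2: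
--                         score_diffs.append(abs(triplet_set[1] - triplet_set[2]))
--                         score_diffs.append(abs(triplet_set[0] - triplet_set[2]))
--
--                     #sort out impossible ones
--                     #diff over 2 is always impossible
--                     if len([x for x in score_diffs if x > 2]) > 0:
--                         continue
--
--                     #diff over 1 can exist only one time
--                     if len([x for x in score_diffs if x > 1]) > 1:
--                         continue
--
--                     surprising = False
--
--                     #2 only one time
--                     if len([x for x in score_diffs if x == 2]) == 1 :
--                         surprising = True
--
--                     all.append(triplet + (surprising,))
--
--     return all
-- ===== SOURCE B (Python) =====
-- def get_possible_triplets(number, best_result_least):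
--     # Simpler: solve c = number-a-b directly and classify by the spread max-min
--     # (valid iff spread <= 2, surprising iff spread == 2).
--     result = []
--     for a in range(11):
--         for b in range(11):
--             c = number - a - b
--             if 0 <= c <= 10:
--                 lo = min(a, b, c)
--                 hi = max(a, b, c)
--                 if hi - lo <= 2:
--                     result.append((a, b, c, hi - lo == 2))
--     return result
-- ===== Notes on version B (the rewrite author's own statement) =====
-- stated objective: simpler
-- what changed: Replaces the innermost c-loop by computing c = number-a-b directly, and replaces the set/score_diffs construction and the three count-based filters by the single spread test hi-lo <= 2 with surprising iff hi-lo == 2.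
import Mathlib
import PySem

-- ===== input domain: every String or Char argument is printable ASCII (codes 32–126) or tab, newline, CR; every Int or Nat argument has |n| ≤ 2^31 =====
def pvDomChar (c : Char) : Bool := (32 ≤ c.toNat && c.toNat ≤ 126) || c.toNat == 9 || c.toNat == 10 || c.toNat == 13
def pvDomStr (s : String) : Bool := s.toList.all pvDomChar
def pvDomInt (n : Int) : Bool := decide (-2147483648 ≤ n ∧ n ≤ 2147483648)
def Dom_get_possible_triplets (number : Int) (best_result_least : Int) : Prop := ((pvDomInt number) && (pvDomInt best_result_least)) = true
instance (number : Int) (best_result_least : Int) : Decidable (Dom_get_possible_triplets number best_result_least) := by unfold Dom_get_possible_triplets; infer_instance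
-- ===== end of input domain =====

-- B replaces A's innermost loop, set/score_diffs machinery and count filters by the
-- direct c = number-a-b and the spread test max-min ≤ 2 (surprising iff = 2): simpler.

-- ===== PORT A =====
-- Innermost loop body of A. list(set(triplet)) is ported with PySem.Set.ofList
-- (first-insertion order); every later use of triplet_set — the multiset of pairwise
-- absolute differences and counts over it — is independent of the set's order, so the
-- port is exact despite CPython's hash order.
def bodyA (number a b : Int) (acc : List (Int × Int × Int × Bool)) (c : Int) : List (Int × Int × Int × Bool) :=
  if a + b + c = number then
    let tset : List Int := PySem.Set.ofList [a, b, c]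
    let sd1 : List Int :=
      if tset.length > 1 then [|PySem.List.pyGetD tset 0 0 - PySem.List.pyGetD tset 1 0|] else []
    let sd : List Int :=
      if tset.length > 2 then
        sd1 ++ [|PySem.List.pyGetD tset 1 0 - PySem.List.pyGetD tset 2 0|,
                |PySem.List.pyGetD tset 0 0 - PySem.List.pyGetD tset 2 0|]
      else sd1
    if (sd.filter (fun x => x > 2)).length > 0 then acc
    else if (sd.filter (fun x => x > 1)).length > 1 then acc
    else
      let surprising : Bool := (sd.filter (fun x => x = 2)).length = 1
      acc ++ [(a, b, c, surprising)]
  else acc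

def get_possible_triplets (number : Int) (best_result_least : Int) : List (Int × Int × Int × Bool) :=
  (PySem.List.pyRange 0 11 1).foldl (fun acc a =>
    (PySem.List.pyRange 0 11 1).foldl (fun acc b =>
      (PySem.List.pyRange 0 11 1).foldl (bodyA number a b) acc) acc) []

-- ===== PORT B =====
def bodyB (number a : Int) (acc : List (Int × Int × Int × Bool)) (b : Int) : List (Int × Int × Int × Bool) :=
  let c := number - a - b
  if 0 ≤ c ∧ c ≤ 10 then
    let lo := min a (min b c)
    let hi := max a (max b c)
    if hi - lo ≤ 2 then acc ++ [(a, b, c, decide (hi - lo = 2))] else acc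
  else acc

def get_possible_triplets_alt (number : Int) (best_result_least : Int) : List (Int × Int × Int × Bool) :=
  (PySem.List.pyRange 0 11 1).foldl (fun acc a =>
    (PySem.List.pyRange 0 11 1).foldl (bodyB number a) acc) []

-- ===== PRECONDITION & SPEC =====
def Spec_get_possible_triplets (number : Int) (best_result_least : Int) (out : List (Int × Int × Int × Bool)) : Prop := out = get_possible_triplets_alt number best_result_least
instance (number : Int) (best_result_least : Int) (out : List (Int × Int × Int × Bool)) : Decidable (Spec_get_possible_triplets number best_result_least out) := by unfold Spec_get_possible_triplets; infer_instance

-- ===== CLAIM (what is proved, stated in full; the proofs are below) =====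
def Claim_equal_get_possible_triplets : Prop := ∀ (number : Int) (best_result_least : Int), Dom_get_possible_triplets number best_result_least → Spec_get_possible_triplets number best_result_least (get_possible_triplets number best_result_least)

-- ===== LEMMAS AND PROOFS =====

-- a fold whose every step fixes the accumulator returns its initial accumulator
theorem pv_foldl_fixed {α β : Type} (f : β → α → β) (l : List α) (init : β)
    (h : ∀ acc x, x ∈ l → f acc x = acc) : l.foldl f init = init := by
  induction l generalizing init with
  | nil => rfl
  | cons x xs ih =>
      rw [List.foldl_cons, h init x (List.mem_cons_self)]
      exact ih init (fun acc y hy => h acc y (List.mem_cons_of_mem _ hy))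

theorem pv_blr_irrelevant_A (number b1 b2 : Int) :
    get_possible_triplets number b1 = get_possible_triplets number b2 := rfl

theorem pv_blr_irrelevant_B (number b1 b2 : Int) :
    get_possible_triplets_alt number b1 = get_possible_triplets_alt number b2 := rfl

theorem pv_A_out_of_range (number blr : Int) (h : number < 0 ∨ 30 < number) :
    get_possible_triplets number blr = [] := by
  unfold get_possible_triplets
  refine pv_foldl_fixed _ _ _ (fun acc a ha => ?_)
  rw [PySem.List.mem_pyRange_one] at ha
  refine pv_foldl_fixed _ _ _ (fun acc b hb => ?_)
  rw [PySem.List.mem_pyRange_one] at hb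
  refine pv_foldl_fixed _ _ _ (fun acc c hc => ?_)
  rw [PySem.List.mem_pyRange_one] at hc
  have hne : a + b + c ≠ number := by omega
  simp [bodyA, hne]

theorem pv_B_out_of_range (number blr : Int) (h : number < 0 ∨ 30 < number) :
    get_possible_triplets_alt number blr = [] := by
  unfold get_possible_triplets_alt
  refine pv_foldl_fixed _ _ _ (fun acc a ha => ?_)
  rw [PySem.List.mem_pyRange_one] at ha
  refine pv_foldl_fixed _ _ _ (fun acc b hb => ?_)
  rw [PySem.List.mem_pyRange_one] at hb
  have hc : ¬ (0 ≤ number - a - b ∧ number - a - b ≤ 10) := by omega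
  simp only [bodyB]
  rw [if_neg hc]

-- ===== VERDICT (by name: the statement is the Claim_ definition above) =====
set_option maxRecDepth 100000 in
theorem get_possible_triplets_spec : Claim_equal_get_possible_triplets := by
  intro number blr _
  unfold Spec_get_possible_triplets
  by_cases h : 0 ≤ number ∧ number ≤ 30
  · obtain ⟨h0, h1⟩ := h
    rw [pv_blr_irrelevant_A number blr 0, pv_blr_irrelevant_B number blr 0]
    interval_cases number <;> decide
  · rw [pv_A_out_of_range number blr (by omega), pv_B_out_of_range number blr (by omega)]
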